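-- pv_equiv track=rewrite | github.com/DavidMandak/Fiks | 12.ročník/Programs/Kolo_1-2.py | subset_find
-- ===== SOURCE A (Python) =====
-- def subset_find(loops: list, goal: int) -> int:
--     last = [-1]*(goal+1)
--     current = [-1]*(goal+1)
--     last[0] = 0
--
--     for amount in range(1, len(loops)+ 1):
--         for num in range(goal+1):
--             check = num-loops[amount-1]
--             if check < 0:
--                 current[num] = last[num]
--             else:
--                 if last[check] != -1 and (last[num] == -1 or last[check]+1 < last[num]):
--                         current[num] = last[check]+1
--                 else:
--                     current[num] = last[num]
--         last = current.copy()
--     return last[goal]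
-- ===== SOURCE B (Python) =====
-- def subset_find(loops: list, goal: int) -> int:
--     # BFS over subset sizes: levels[k] holds the sums attainable with exactly k
--     # loops, pruning sums already attainable with fewer loops (they are dominated);
--     # the answer is the index of the first level containing goal.
--     levels = [{0}]
--     for x in loops:
--         new_levels = []
--         seen = set()   # union of levels[0..k-1]
--         prev = set()   # levels[k-1]
--         for lvl in levels:
--             add = {t + x for t in prev if t + x <= goal and t + x not in seen}
--             new_levels.append(lvl | add if add else lvl)
--             seen |= lvl
--             prev = lvl
--         top = {t + x for t in prev if t + x <= goal and t + x not in seen}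
--         if top:
--             new_levels.append(top)
--         levels = new_levels
--     for k, lvl in enumerate(levels):
--         if goal in lvl:
--             return k
--     return -1
-- ===== Notes on version B (the rewrite author's own statement) =====
-- stated objective: alternative
-- what changed: Replaces A's bottom-up min-count-per-sum DP over two rolling (goal+1)-sized arrays by a BFS over subset sizes: it maintains levels[k] = the set of sums attainable with exactly k loops (pruning sums already attainable with fewer loops) and returns the index of the first level containing goal.
import Mathlib
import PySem

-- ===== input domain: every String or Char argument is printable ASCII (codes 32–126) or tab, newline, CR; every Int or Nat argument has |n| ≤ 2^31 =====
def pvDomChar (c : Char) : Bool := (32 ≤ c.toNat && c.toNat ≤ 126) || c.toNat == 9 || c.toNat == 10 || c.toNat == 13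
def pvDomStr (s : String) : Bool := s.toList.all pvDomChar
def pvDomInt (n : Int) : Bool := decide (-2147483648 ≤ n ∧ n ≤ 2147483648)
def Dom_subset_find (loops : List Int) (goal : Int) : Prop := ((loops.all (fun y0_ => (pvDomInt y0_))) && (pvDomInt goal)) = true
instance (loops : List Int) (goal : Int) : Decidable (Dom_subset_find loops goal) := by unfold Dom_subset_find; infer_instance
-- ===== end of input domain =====

-- B replaces A's min-count-per-sum rolling arrays by a BFS over subset sizes (levels of
-- exact-cardinality reachable sums with dominated sums pruned; answer = first level holding
-- goal) — an alternative algorithm of comparable cost, not claimed faster.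


-- ===== PORT A =====
def subset_find (loops : List Int) (goal : Int) : Int :=
  let last0 : Array Int := (Array.replicate (goal + 1).toNat (-1 : Int)).setIfInBounds 0 0
  let current0 : Array Int := Array.replicate (goal + 1).toNat (-1 : Int)
  let st := (PySem.List.pyRange 1 (PySem.List.len loops + 1) 1).foldl
    (fun (st : Array Int × Array Int) amount =>
      let current := (PySem.List.pyRange 0 (goal + 1) 1).foldl
        (fun current num =>
          let check := num - PySem.List.pyGetD loops (amount - 1) 0
          if check < 0 then
            current.setIfInBounds num.toNat (st.1.getD num.toNat 0)
          else
            if st.1.getD check.toNat 0 ≠ -1 ∧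
               (st.1.getD num.toNat 0 = -1 ∨
                st.1.getD check.toNat 0 + 1 < st.1.getD num.toNat 0) then
              current.setIfInBounds num.toNat (st.1.getD check.toNat 0 + 1)
            else
              current.setIfInBounds num.toNat (st.1.getD num.toNat 0))
        st.2
      (current, current))
    (last0, current0)
  st.1.getD goal.toNat (-1)

-- ===== PORT B =====
-- {t + x for t in prev if t + x <= goal and t + x not in seen}
-- (iterates a Python set only to BUILD another set; the result is consumed as a set)
def shiftAdd (goal x : Int) (prev seen : PySem.Set Int) : PySem.Set Int :=
  PySem.Set.ofList
    ((prev.filter (fun t => decide (t + x ≤ goal) && !(PySem.Set.contains seen (t + x)))).map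
      (fun t => t + x))

-- the per-item 'for lvl in levels' loop plus the trailing top-level append
def stepRec (goal x : Int) : PySem.Set Int → PySem.Set Int → List (PySem.Set Int) → List (PySem.Set Int)
  | prev, seen, [] =>
      let top := shiftAdd goal x prev seen
      if top.isEmpty then [] else [top]
  | prev, seen, lvl :: rest =>
      let add := shiftAdd goal x prev seen
      (if add.isEmpty then lvl else PySem.Set.union lvl add) ::
        stepRec goal x lvl (PySem.Set.union seen lvl) rest

-- the final 'for k, lvl in enumerate(levels): if goal in lvl: return k'
def scanLevels (goal : Int) : List (PySem.Set Int) → Int → Int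
  | [], _ => -1
  | lvl :: rest, k => if PySem.Set.contains lvl goal then k else scanLevels goal rest (k + 1)

def subset_find_alt (loops : List Int) (goal : Int) : Int :=
  let levels := loops.foldl
    (fun levels x => stepRec goal x PySem.Set.empty PySem.Set.empty levels)
    [PySem.Set.ofList [(0 : Int)]]
  scanLevels goal levels 0

-- ===== PRECONDITION & SPEC =====
-- Pre_ excludes exactly the raising inputs: goal < 0 (last[0] = 0 on an empty list, IndexError)
-- and any negative loop value (last[check] with check > goal, IndexError).
def Pre_subset_find (loops : List Int) (goal : Int) : Prop :=
  0 ≤ goal ∧ ∀ x ∈ loops, 0 ≤ x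
instance (loops : List Int) (goal : Int) : Decidable (Pre_subset_find loops goal) := by
  unfold Pre_subset_find; infer_instance
def pvWitness_subset_find : List Int × Int := ([1, 2, 3], 4)

def Spec_subset_find (loops : List Int) (goal : Int) (out : Int) : Prop := out = subset_find_alt loops goal
instance (loops : List Int) (goal : Int) (out : Int) : Decidable (Spec_subset_find loops goal out) := by unfold Spec_subset_find; infer_instance

-- ===== CLAIM (what is proved, stated in full; the proofs are below) =====
def Claim_equal_subset_find : Prop := ∀ (loops : List Int) (goal : Int), Dom_subset_find loops goal → Pre_subset_find loops goal → Spec_subset_find loops goal (subset_find loops goal)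

-- ===== LEMMAS AND PROOFS =====

-- proof-only helpers: A's inner loop as a standalone function and the value it writes
def innerA (goal x : Int) (last cur : Array Int) : Array Int :=
  (PySem.List.pyRange 0 (goal + 1) 1).foldl
    (fun current num =>
      let check := num - x
      if check < 0 then
        current.setIfInBounds num.toNat (last.getD num.toNat 0)
      else
        if last.getD check.toNat 0 ≠ -1 ∧
           (last.getD num.toNat 0 = -1 ∨
            last.getD check.toNat 0 + 1 < last.getD num.toNat 0) then
          current.setIfInBounds num.toNat (last.getD check.toNat 0 + 1)
        else
          current.setIfInBounds num.toNat (last.getD num.toNat 0))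
    cur

def gA (x : Int) (last : Array Int) (num : Int) : Int :=
  let check := num - x
  if check < 0 then last.getD num.toNat 0
  else if last.getD check.toNat 0 ≠ -1 ∧
          (last.getD num.toNat 0 = -1 ∨
           last.getD check.toNat 0 + 1 < last.getD num.toNat 0) then
    last.getD check.toNat 0 + 1
  else last.getD num.toNat 0

theorem arr_getD_lt (a : Array Int) (n : Nat) (d : Int) (h : n < a.size) :
    a.getD n d = a[n] := by
  simp [Array.getD, h]

theorem arr_set_getElem_ne (a : Array Int) (i j : Nat) (v : Int) (hne : i ≠ j)
    (hja : j < a.size) (hj : j < (a.setIfInBounds i v).size) :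
    (a.setIfInBounds i v)[j] = a[j] := by
  have h1 : (a.setIfInBounds i v)[j]? = a[j]? := by simp [hne]
  rw [Array.getElem?_eq_getElem hj, Array.getElem?_eq_getElem hja] at h1
  exact Option.some.inj h1

theorem foldl_set_range (g : Nat → Int) : ∀ (b : Nat) (cur : Array Int),
  ((List.range b).foldl (fun c k => c.setIfInBounds k (g k)) cur).size = cur.size ∧
  (∀ n : Nat, n < cur.size →
    ((List.range b).foldl (fun c k => c.setIfInBounds k (g k)) cur).getD n (-1) =
      if n < b then g n else cur.getD n (-1)) := by
  intro b
  induction b with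
  | zero => intro cur; simp
  | succ b ih =>
    intro cur
    rw [List.range_succ, List.foldl_append]
    obtain ⟨hl, hp⟩ := ih cur
    simp only [List.foldl_cons, List.foldl_nil]
    constructor
    · simp [hl]
    · intro n hn
      set A := (List.range b).foldl (fun c k => c.setIfInBounds k (g k)) cur with hA
      have hnA : n < A.size := by rw [hl]; exact hn
      rcases eq_or_ne n b with rfl | hne
      · have hbA : n < (A.setIfInBounds n (g n)).size := by
          rw [Array.size_setIfInBounds]; exact hnA
        rw [arr_getD_lt _ _ _ hbA]
        rw [Array.getElem_setIfInBounds_self]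
        simp
      · have hsz : n < (A.setIfInBounds b (g b)).size := by
          rw [Array.size_setIfInBounds]; exact hnA
        rw [arr_getD_lt _ _ _ hsz]
        rw [arr_set_getElem_ne A b n (g b) (Ne.symm hne) hnA hsz]
        rw [← arr_getD_lt A n (-1) hnA, hp n hn]
        by_cases h : n < b
        · simp [h, show n < b + 1 by omega]
        · simp [h, show ¬ n < b + 1 by omega]

theorem innerA_spec (goal x : Int) (last cur : Array Int) (hg : 0 ≤ goal)
    (hlen : cur.size = (goal + 1).toNat) :
    (innerA goal x last cur).size = (goal + 1).toNat ∧
    ∀ n : Nat, n < (goal + 1).toNat →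
      (innerA goal x last cur).getD n (-1) = gA x last (n : Int) := by
  have hshape : innerA goal x last cur =
      (List.range (goal + 1).toNat).foldl (fun c k => c.setIfInBounds k (gA x last (k : Int))) cur := by
    unfold innerA
    rw [PySem.List.pyRange_one]
    rw [List.foldl_map]
    have : ((goal + 1) - 0).toNat = (goal + 1).toNat := by omega
    rw [this]
    apply PySem.List.foldl_congr_mem
    intro acc k _
    simp only [gA, zero_add, Int.toNat_natCast]
    split_ifs <;> rfl
  obtain ⟨h1, h2⟩ := foldl_set_range (fun k => gA x last (k : Int)) (goal + 1).toNat cur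
  rw [hshape]
  refine ⟨by rw [h1, hlen], ?_⟩
  intro n hn
  rw [h2 n (by omega)]
  simp [hn]

-- B-side proof machinery: occurrence of a sum at a level index, and the first such index
def occ (L : List (PySem.Set Int)) (k : Nat) (s : Int) : Prop :=
  ∃ lvl, L[k]? = some lvl ∧ s ∈ lvl

def fIdx (L : List (PySem.Set Int)) (s : Int) : Option Nat :=
  L.findIdx? (fun lvl => PySem.Set.contains lvl s)

def intOf : Option Nat → Int
  | none => -1
  | some k => (k : Int)

def combineO : Option Nat → Option Nat → Option Nat
  | a, none => a
  | none, some m => some (m + 1)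
  | some a0, some m => if m + 1 < a0 then some (m + 1) else some a0

def Bnd (goal : Int) (L : List (PySem.Set Int)) : Prop :=
  ∀ lvl ∈ L, ∀ s ∈ lvl, 0 ≤ s ∧ s ≤ goal

theorem mem_shiftAdd (goal x : Int) (prev seen : PySem.Set Int) (s : Int) :
    s ∈ shiftAdd goal x prev seen ↔ (s - x) ∈ prev ∧ s ≤ goal ∧ s ∉ seen := by
  unfold shiftAdd
  rw [PySem.Set.mem_ofList _ _]
  constructor
  · intro hm
    rcases List.mem_map.mp hm with ⟨t, htf, rfl⟩
    rcases List.mem_filter.mp htf with ⟨ht, hcond⟩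
    simp only [Bool.and_eq_true, decide_eq_true_eq, Bool.not_eq_true'] at hcond
    obtain ⟨h1, h2⟩ := hcond
    refine ⟨by simpa using ht, h1, fun hmem => ?_⟩
    have h3 := (PySem.Set.contains_iff seen (t + x)).mpr hmem
    rw [h3] at h2
    cases h2
  · rintro ⟨hp, hg, hns⟩
    apply List.mem_map.mpr
    refine ⟨s - x, List.mem_filter.mpr ⟨hp, ?_⟩, by ring⟩
    simp only [Bool.and_eq_true, decide_eq_true_eq, Bool.not_eq_true']
    have hsx : s - x + x = s := by ring
    rw [hsx]
    refine ⟨hg, ?_⟩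
    rw [Bool.eq_false_iff]
    intro hc
    exact hns ((PySem.Set.contains_iff seen s).mp hc)

theorem occ_nil (k : Nat) (s : Int) : ¬ occ [] k s := by
  rintro ⟨lvl, h, _⟩; simp at h

theorem occ_cons_zero (lvl : PySem.Set Int) (rest : List (PySem.Set Int)) (s : Int) :
    occ (lvl :: rest) 0 s ↔ s ∈ lvl := by
  constructor
  · rintro ⟨l, h, hm⟩; simp at h; exact h ▸ hm
  · intro h; exact ⟨lvl, rfl, h⟩

theorem occ_cons_succ (lvl : PySem.Set Int) (rest : List (PySem.Set Int)) (k : Nat) (s : Int) :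
    occ (lvl :: rest) (k + 1) s ↔ occ rest k s := by
  unfold occ; simp

-- membership characterization of one item step of B
theorem occ_stepRec (goal x : Int) :
    ∀ (L : List (PySem.Set Int)) (prev seen : PySem.Set Int) (k : Nat) (s : Int),
    occ (stepRec goal x prev seen L) k s ↔
      occ L k s ∨ (s ≤ goal ∧ s ∉ seen ∧ (∀ j < k, ¬ occ L j s) ∧
        (if k = 0 then (s - x) ∈ prev else occ L (k - 1) (s - x))) := by
  intro L
  induction L with
  | nil =>
    intro prev seen k s
    have htop : ∀ k', occ (stepRec goal x prev seen []) k' s ↔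
        (k' = 0 ∧ s ∈ shiftAdd goal x prev seen) := by
      intro k'
      show occ (if (shiftAdd goal x prev seen).isEmpty then [] else [shiftAdd goal x prev seen]) k' s ↔ _
      by_cases he : (shiftAdd goal x prev seen).isEmpty
      · rw [if_pos he]
        have hnil : shiftAdd goal x prev seen = [] := List.isEmpty_iff.mp he
        constructor
        · intro h; exact absurd h (occ_nil _ _)
        · rintro ⟨_, hm⟩; rw [hnil] at hm; simp at hm
      · rw [if_neg he]
        cases k' with
        | zero =>
          rw [occ_cons_zero]
          constructor
          · intro h; exact ⟨rfl, h⟩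
          · rintro ⟨_, h⟩; exact h
        | succ m =>
          rw [occ_cons_succ]
          constructor
          · intro h; exact absurd h (occ_nil _ _)
          · rintro ⟨h, _⟩; cases h
    cases k with
    | zero =>
      rw [htop 0, mem_shiftAdd, if_pos rfl]
      constructor
      · rintro ⟨_, hp, hg, hns⟩
        exact Or.inr ⟨hg, hns, by intro j hj; omega, hp⟩
      · rintro (h | ⟨hg, hns, _, hp⟩)
        · exact absurd h (occ_nil _ _)
        · exact ⟨rfl, hp, hg, hns⟩
    | succ m =>
      rw [htop (m + 1)]
      have h1 : (if m + 1 = 0 then (s - x) ∈ prev else occ [] (m + 1 - 1) (s - x)) =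
          occ [] m (s - x) := if_neg (Nat.succ_ne_zero m)
      rw [h1]
      constructor
      · rintro ⟨h, _⟩; cases h
      · rintro (h | ⟨_, _, _, hm⟩)
        · exact absurd h (occ_nil _ _)
        · exact absurd hm (occ_nil _ _)
  | cons lvl rest ih =>
    intro prev seen k s
    show occ ((if (shiftAdd goal x prev seen).isEmpty then lvl
        else PySem.Set.union lvl (shiftAdd goal x prev seen)) ::
        stepRec goal x lvl (PySem.Set.union seen lvl) rest) k s ↔ _
    cases k with
    | zero =>
      rw [occ_cons_zero, if_pos rfl]
      have hhead : s ∈ (if (shiftAdd goal x prev seen).isEmpty then lvl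
          else PySem.Set.union lvl (shiftAdd goal x prev seen)) ↔
          s ∈ lvl ∨ s ∈ shiftAdd goal x prev seen := by
        by_cases he : (shiftAdd goal x prev seen).isEmpty
        · rw [if_pos he]
          have hnil : shiftAdd goal x prev seen = [] := List.isEmpty_iff.mp he
          rw [hnil]; simp
        · rw [if_neg he]
          exact PySem.Set.mem_union _ _ _
      rw [hhead, mem_shiftAdd, occ_cons_zero]
      constructor
      · rintro (h | ⟨hp, hg, hns⟩)
        · exact Or.inl h
        · exact Or.inr ⟨hg, hns, by intro j hj; omega, hp⟩
      · rintro (h | ⟨hg, hns, _, hp⟩)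
        · exact Or.inl h
        · exact Or.inr ⟨hp, hg, hns⟩
    | succ m =>
      rw [occ_cons_succ, ih lvl (PySem.Set.union seen lvl) m s, occ_cons_succ]
      have h1 : (if m + 1 = 0 then (s - x) ∈ prev else occ (lvl :: rest) (m + 1 - 1) (s - x)) =
          occ (lvl :: rest) m (s - x) := if_neg (Nat.succ_ne_zero m)
      rw [h1]
      have hseen : s ∉ PySem.Set.union seen lvl ↔ (s ∉ seen ∧ s ∉ lvl) := by
        rw [show (s ∉ PySem.Set.union seen lvl) = ¬ (s ∈ PySem.Set.union seen lvl) from rfl]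
        rw [PySem.Set.mem_union _ _ _]; tauto
      have hbelow : (∀ j < m + 1, ¬ occ (lvl :: rest) j s) ↔
          (s ∉ lvl ∧ ∀ j < m, ¬ occ rest j s) := by
        constructor
        · intro h
          refine ⟨fun hm => h 0 (by omega) ((occ_cons_zero _ _ _).mpr hm), ?_⟩
          intro j hj hocc
          exact h (j + 1) (by omega) ((occ_cons_succ _ _ _ _).mpr hocc)
        · rintro ⟨h0, h⟩ j hj hocc
          cases j with
          | zero => exact h0 ((occ_cons_zero _ _ _).mp hocc)
          | succ j' => exact h j' (by omega) ((occ_cons_succ _ _ _ _).mp hocc)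
      have hsrc : occ (lvl :: rest) m (s - x) ↔
          (if m = 0 then (s - x) ∈ lvl else occ rest (m - 1) (s - x)) := by
        cases m with
        | zero => rw [if_pos rfl, occ_cons_zero]
        | succ m' =>
          have h2 : (if m' + 1 = 0 then (s - x) ∈ lvl else occ rest (m' + 1 - 1) (s - x)) =
              occ rest m' (s - x) := if_neg (Nat.succ_ne_zero m')
          rw [h2, occ_cons_succ]
      rw [hseen, hbelow, hsrc]
      tauto

theorem fIdx_eq_none_iff (L : List (PySem.Set Int)) (s : Int) :
    fIdx L s = none ↔ ∀ k, ¬ occ L k s := by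
  induction L with
  | nil =>
    unfold fIdx
    simp only [List.findIdx?_nil]
    exact ⟨fun _ k => occ_nil k s, fun _ => by trivial⟩
  | cons lvl rest ih =>
    unfold fIdx at *
    rw [List.findIdx?_cons]
    by_cases hc : PySem.Set.contains lvl s
    · rw [if_pos hc]
      constructor
      · intro h; cases h
      · intro h
        exact absurd ((occ_cons_zero _ _ _).mpr ((PySem.Set.contains_iff _ _).mp hc)) (h 0)
    · rw [if_neg hc]
      constructor
      · intro h k
        have hrest := ih.mp (by cases hfi : rest.findIdx? (fun lvl => PySem.Set.contains lvl s) with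
          | none => rfl
          | some j => rw [hfi] at h; simp at h)
        cases k with
        | zero =>
          intro hocc
          exact hc ((PySem.Set.contains_iff _ _).mpr ((occ_cons_zero _ _ _).mp hocc))
        | succ m => intro hocc; exact hrest m ((occ_cons_succ _ _ _ _).mp hocc)
      · intro h
        have : rest.findIdx? (fun lvl => PySem.Set.contains lvl s) = none :=
          ih.mpr (fun k hocc => h (k + 1) ((occ_cons_succ _ _ _ _).mpr hocc))
        rw [this]; rfl

theorem fIdx_eq_some_iff (L : List (PySem.Set Int)) (s : Int) :
    ∀ k, fIdx L s = some k ↔ (occ L k s ∧ ∀ j < k, ¬ occ L j s) := by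
  induction L with
  | nil =>
    intro k
    unfold fIdx
    simp only [List.findIdx?_nil]
    constructor
    · intro h; cases h
    · rintro ⟨hocc, _⟩; exact absurd hocc (occ_nil _ _)
  | cons lvl rest ih =>
    intro k
    unfold fIdx at *
    rw [List.findIdx?_cons]
    by_cases hc : PySem.Set.contains lvl s
    · rw [if_pos hc]
      constructor
      · intro h
        have hk : k = 0 := by cases h; rfl
        subst hk
        exact ⟨(occ_cons_zero _ _ _).mpr ((PySem.Set.contains_iff _ _).mp hc),
          fun j hj => by omega⟩
      · rintro ⟨hocc, hmin⟩
        cases k with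
        | zero => rfl
        | succ m =>
          exact absurd ((occ_cons_zero _ _ _).mpr ((PySem.Set.contains_iff _ _).mp hc))
            (hmin 0 (by omega))
    · rw [if_neg hc]
      constructor
      · intro h
        cases hfi : rest.findIdx? (fun lvl => PySem.Set.contains lvl s) with
        | none => rw [hfi] at h; simp at h
        | some j =>
          rw [hfi] at h
          simp only [Option.map_some] at h
          have hk : k = j + 1 := by cases h; rfl
          subst hk
          obtain ⟨hocc, hmin⟩ := (ih j).mp hfi
          refine ⟨(occ_cons_succ _ _ _ _).mpr hocc, ?_⟩
          intro i hi
          cases i with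
          | zero =>
            intro hocc0
            exact hc ((PySem.Set.contains_iff _ _).mpr ((occ_cons_zero _ _ _).mp hocc0))
          | succ i' =>
            intro hocci
            exact hmin i' (by omega) ((occ_cons_succ _ _ _ _).mp hocci)
      · rintro ⟨hocc, hmin⟩
        cases k with
        | zero =>
          exact absurd hc (fun hcc => (by
            exact absurd ((occ_cons_zero _ _ _).mp hocc) (fun hm => hcc ((PySem.Set.contains_iff _ _).mpr hm))))
        | succ m =>
          have : rest.findIdx? (fun lvl => PySem.Set.contains lvl s) = some m := by
            apply (ih m).mpr
            refine ⟨(occ_cons_succ _ _ _ _).mp hocc, ?_⟩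
            intro j hj hocc'
            exact hmin (j + 1) (by omega) ((occ_cons_succ _ _ _ _).mpr hocc')
          rw [this]; rfl

-- the first-index recurrence: one B step combines the old first indices exactly as A's cell update
theorem fIdx_stepRec (goal x : Int) (L : List (PySem.Set Int))
    (n : Int) (hng : n ≤ goal) :
    fIdx (stepRec goal x PySem.Set.empty PySem.Set.empty L) n =
      combineO (fIdx L n) (fIdx L (n - x)) := by
  have hocc : ∀ k, occ (stepRec goal x PySem.Set.empty PySem.Set.empty L) k n ↔
      occ L k n ∨ ((∀ j < k, ¬ occ L j n) ∧ k ≠ 0 ∧ occ L (k - 1) (n - x)) := by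
    intro k
    rw [occ_stepRec goal x L PySem.Set.empty PySem.Set.empty k n]
    have hns : n ∉ (PySem.Set.empty : PySem.Set Int) := by simp [PySem.Set.empty]
    cases k with
    | zero =>
      rw [if_pos rfl]
      constructor
      · rintro (h | ⟨_, _, _, hp⟩)
        · exact Or.inl h
        · exact absurd hp (by simp [PySem.Set.empty])
      · rintro (h | ⟨_, hk, _⟩)
        · exact Or.inl h
        · exact absurd rfl hk
    | succ m =>
      have h1 : (if m + 1 = 0 then (n - x) ∈ (PySem.Set.empty : PySem.Set Int)
          else occ L (m + 1 - 1) (n - x)) = occ L m (n - x) := if_neg (Nat.succ_ne_zero m)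
      rw [h1]
      constructor
      · rintro (h | ⟨_, _, hmin, hm⟩)
        · exact Or.inl h
        · exact Or.inr ⟨hmin, Nat.succ_ne_zero m, hm⟩
      · rintro (h | ⟨hmin, _, hm⟩)
        · exact Or.inl h
        · exact Or.inr ⟨hng, hns, hmin, hm⟩
  cases hb : fIdx L (n - x) with
  | none =>
    have hnone := (fIdx_eq_none_iff L (n - x)).mp hb
    have heq : ∀ k, occ (stepRec goal x PySem.Set.empty PySem.Set.empty L) k n ↔ occ L k n := by
      intro k
      rw [hocc k]
      constructor
      · rintro (h | ⟨_, _, hm⟩)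
        · exact h
        · exact absurd hm (hnone (k - 1))
      · exact Or.inl
    show _ = fIdx L n
    cases ha : fIdx L n with
    | none =>
      apply (fIdx_eq_none_iff _ _).mpr
      intro k h
      exact (fIdx_eq_none_iff L n).mp ha k ((heq k).mp h)
    | some a0 =>
      obtain ⟨h1, h2⟩ := (fIdx_eq_some_iff L n a0).mp ha
      apply (fIdx_eq_some_iff _ _ a0).mpr
      exact ⟨(heq a0).mpr h1, fun j hj h => h2 j hj ((heq j).mp h)⟩
  | some m =>
    obtain ⟨hbm, hbmin⟩ := (fIdx_eq_some_iff L (n - x) m).mp hb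
    cases ha : fIdx L n with
    | none =>
      have hanone := (fIdx_eq_none_iff L n).mp ha
      show _ = some (m + 1)
      apply (fIdx_eq_some_iff _ _ (m + 1)).mpr
      constructor
      · exact (hocc (m + 1)).mpr (Or.inr ⟨fun j _ => hanone j, Nat.succ_ne_zero m, hbm⟩)
      · intro j hj hoccj
        rcases (hocc j).mp hoccj with h | ⟨_, hj0, hm⟩
        · exact hanone j h
        · exact hbmin (j - 1) (by omega) hm
    | some a0 =>
      obtain ⟨ham, hamin⟩ := (fIdx_eq_some_iff L n a0).mp ha
      show _ = if m + 1 < a0 then some (m + 1) else some a0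
      by_cases hlt : m + 1 < a0
      · rw [if_pos hlt]
        apply (fIdx_eq_some_iff _ _ (m + 1)).mpr
        constructor
        · exact (hocc (m + 1)).mpr (Or.inr ⟨fun j hj => hamin j (by omega), Nat.succ_ne_zero m, hbm⟩)
        · intro j hj hoccj
          rcases (hocc j).mp hoccj with h | ⟨_, hj0, hm⟩
          · exact hamin j (by omega) h
          · exact hbmin (j - 1) (by omega) hm
      · rw [if_neg hlt]
        apply (fIdx_eq_some_iff _ _ a0).mpr
        constructor
        · exact (hocc a0).mpr (Or.inl ham)
        · intro j hj hoccj
          rcases (hocc j).mp hoccj with h | ⟨_, hj0, hm⟩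
          · exact hamin j hj h
          · have : m ≤ j - 1 := by
              by_contra hc
              exact hbmin (j - 1) (by omega) hm
            omega

theorem Bnd_stepRec (goal x : Int) (hx : 0 ≤ x) :
    ∀ (L : List (PySem.Set Int)) (prev seen : PySem.Set Int),
      Bnd goal L → (∀ t ∈ prev, 0 ≤ t ∧ t ≤ goal) →
      Bnd goal (stepRec goal x prev seen L) := by
  intro L
  induction L with
  | nil =>
    intro prev seen _ hprev lvl hlvl s hs
    have hstep : stepRec goal x prev seen [] =
        (if (shiftAdd goal x prev seen).isEmpty then []
         else [shiftAdd goal x prev seen]) := rfl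
    rw [hstep] at hlvl
    by_cases he : (shiftAdd goal x prev seen).isEmpty
    · rw [if_pos he] at hlvl
      simp at hlvl
    · rw [if_neg he] at hlvl
      have hl : lvl = shiftAdd goal x prev seen := by simpa using hlvl
      subst hl
      obtain ⟨hp, hg, _⟩ := (mem_shiftAdd goal x prev seen s).mp hs
      have := hprev _ hp
      omega
  | cons lvl0 rest ih =>
    intro prev seen hB hprev lvl hlvl s hs
    have hlvl0 := hB lvl0 (by simp)
    simp only [stepRec] at hlvl
    rcases List.mem_cons.mp hlvl with rfl | hmem
    · by_cases he : (shiftAdd goal x prev seen).isEmpty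
      · rw [if_pos he] at hs
        exact hlvl0 s hs
      · rw [if_neg he] at hs
        rcases (PySem.Set.mem_union _ _ _).mp hs with h | h
        · exact hlvl0 s h
        · obtain ⟨hp, hg, _⟩ := (mem_shiftAdd goal x prev seen s).mp h
          have := hprev _ hp
          omega
    · exact ih lvl0 (PySem.Set.union seen lvl0)
        (fun l hl => hB l (by simp [hl])) hlvl0 lvl hmem s hs

-- the joint invariant: A's rolling array against B's levels
def RepInv (goal : Int) (last : Array Int) (L : List (PySem.Set Int)) : Prop :=
  last.size = (goal + 1).toNat ∧ Bnd goal L ∧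
  ∀ n : Nat, n < (goal + 1).toNat → last.getD n (-1) = intOf (fIdx L (n : Int))

theorem step_RepInv (goal x : Int) (hg : 0 ≤ goal) (hx : 0 ≤ x)
    (last cur : Array Int) (L : List (PySem.Set Int))
    (h : RepInv goal last L) (hlen : cur.size = (goal + 1).toNat) :
    RepInv goal (innerA goal x last cur) (stepRec goal x PySem.Set.empty PySem.Set.empty L) := by
  obtain ⟨hL, hB, hR⟩ := h
  obtain ⟨hA1, hA2⟩ := innerA_spec goal x last cur hg hlen
  refine ⟨hA1, Bnd_stepRec goal x hx L PySem.Set.empty PySem.Set.empty hB (by simp [PySem.Set.empty]), ?_⟩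
  intro n hn
  rw [hA2 n hn]
  have hread : ∀ m : Int, 0 ≤ m → m ≤ goal →
      last.getD m.toNat 0 = intOf (fIdx L m) := by
    intro m h0 h1
    have hm : m.toNat < last.size := by rw [hL]; omega
    rw [arr_getD_lt _ _ _ hm, ← arr_getD_lt last m.toNat (-1) hm]
    have := hR m.toNat (by omega)
    rw [this, Int.toNat_of_nonneg h0]
  have hn' : (0 : Int) ≤ (n : Int) ∧ (n : Int) ≤ goal := ⟨Int.natCast_nonneg n, by omega⟩
  rw [fIdx_stepRec goal x L (n : Int) hn'.2]
  have hrn : last.getD ((n : Int)).toNat 0 = intOf (fIdx L (n : Int)) := hread (n : Int) hn'.1 hn'.2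
  unfold gA
  by_cases hc : (n : Int) - x < 0
  · rw [if_pos hc]
    have hnone : fIdx L ((n : Int) - x) = none := by
      apply (fIdx_eq_none_iff _ _).mpr
      rintro k ⟨lvl, hk, hm⟩
      have := hB lvl (List.mem_of_getElem? hk) _ hm
      omega
    rw [hnone, hrn]
    rfl
  · rw [if_neg hc]
    have hrc := hread ((n : Int) - x) (by omega) (by omega)
    cases hd : fIdx L ((n : Int) - x) with
    | none =>
      rw [hd] at hrc
      have hrcv : last.getD ((n : Int) - x).toNat 0 = -1 := hrc
      rw [if_neg (by rw [hrcv]; simp), hrn]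
      rfl
    | some m =>
      rw [hd] at hrc
      have hrcv : last.getD ((n : Int) - x).toNat 0 = (m : Int) := hrc
      cases hdn : fIdx L (n : Int) with
      | none =>
        have hrnv : last.getD ((n : Int)).toNat 0 = -1 := by rw [hrn, hdn]; rfl
        rw [hrcv, hrnv]
        rw [if_pos ⟨by omega, Or.inl rfl⟩]
        show ((m : Int) + 1) = intOf (some (m + 1))
        simp [intOf]
      | some a0 =>
        have hrnv : last.getD ((n : Int)).toNat 0 = (a0 : Int) := by rw [hrn, hdn]; rfl
        rw [hrcv, hrnv]
        show _ = intOf (if m + 1 < a0 then some (m + 1) else some a0)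
        by_cases hlt : m + 1 < a0
        · rw [if_pos hlt]
          rw [if_pos ⟨by omega, Or.inr (by omega)⟩]
          simp [intOf]
        · rw [if_neg hlt]
          have hcond : ¬ (((m : Nat) : Int) ≠ -1 ∧ (((a0 : Nat) : Int) = -1 ∨ ((m : Nat) : Int) + 1 < ((a0 : Nat) : Int))) := by
            rintro ⟨_, (h | h)⟩ <;> omega
          rw [if_neg hcond]
          simp [intOf]

theorem outer_Rep (goal : Int) (hg : 0 ≤ goal) :
    ∀ (loops : List Int), (∀ x ∈ loops, 0 ≤ x) →
    ∀ (last cur : Array Int) (L : List (PySem.Set Int)),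
      RepInv goal last L → cur.size = (goal + 1).toNat →
      RepInv goal
        (loops.foldl
          (fun (st : Array Int × Array Int) x => ((innerA goal x st.1 st.2), (innerA goal x st.1 st.2)))
          (last, cur)).1
        (loops.foldl (fun L x => stepRec goal x PySem.Set.empty PySem.Set.empty L) L) := by
  intro loops
  induction loops with
  | nil => intro _ last cur L h _; exact h
  | cons x l ih =>
    intro hx last cur L h hlen
    simp only [List.foldl_cons]
    exact ih (fun y hy => hx y (List.mem_cons_of_mem x hy))
      (innerA goal x last cur) (innerA goal x last cur)
      (stepRec goal x PySem.Set.empty PySem.Set.empty L)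
      (step_RepInv goal x hg (hx x List.mem_cons_self) last cur L h hlen)
      (step_RepInv goal x hg (hx x List.mem_cons_self) last cur L h hlen).1

theorem init_RepInv (goal : Int) (hg : 0 ≤ goal) :
    RepInv goal ((Array.replicate (goal + 1).toNat (-1 : Int)).setIfInBounds 0 0)
      [PySem.Set.ofList [(0 : Int)]] := by
  refine ⟨by simp, ?_, ?_⟩
  · intro lvl hlvl s hs
    have : lvl = [(0 : Int)] := by simpa using hlvl
    subst this
    have : s = 0 := by simpa using hs
    omega
  · intro n hn
    have hfi : fIdx [PySem.Set.ofList [(0 : Int)]] (n : Int) =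
        if (n : Int) = 0 then some 0 else none := by
      unfold fIdx
      rw [List.findIdx?_cons]
      by_cases h0 : (n : Int) = 0
      · rw [if_pos h0]
        have : PySem.Set.contains (PySem.Set.ofList [(0 : Int)]) (n : Int) = true := by
          apply (PySem.Set.contains_iff _ _).mpr
          rw [PySem.Set.mem_ofList _ _]
          simp [h0]
        rw [if_pos this]
      · rw [if_neg h0]
        have : PySem.Set.contains (PySem.Set.ofList [(0 : Int)]) (n : Int) = false := by
          rw [Bool.eq_false_iff]
          intro hc
          have := (PySem.Set.contains_iff _ _).mp hc
          rw [PySem.Set.mem_ofList _ _] at this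
          simp at this
          exact h0 (by exact_mod_cast this)
        rw [this]
        simp
    rw [hfi]
    have hsz : n < ((Array.replicate (goal + 1).toNat (-1 : Int)).setIfInBounds 0 0).size := by
      simpa using hn
    rw [arr_getD_lt _ _ _ hsz]
    rcases Nat.eq_zero_or_pos n with rfl | hpos
    · rw [if_pos (by norm_num)]
      rw [Array.getElem_setIfInBounds_self]
      rfl
    · have hne : ((n : Int) ≠ 0) := by omega
      rw [if_neg hne]
      have hra : n < (Array.replicate (goal + 1).toNat (-1 : Int)).size := by simpa using hn
      rw [arr_set_getElem_ne _ 0 n 0 (by omega) hra hsz]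
      rw [Array.getElem_replicate]
      rfl

-- helper: fold over range-with-getD is fold over the list
theorem foldl_range_getD {β : Type} (f : β → Int → β) :
    ∀ (l : List Int) (init : β),
      (List.range l.length).foldl (fun st k => f st (l.getD k 0)) init = l.foldl f init := by
  intro l
  induction l using List.reverseRecOn with
  | nil => intro init; simp
  | append_singleton ys y ih =>
    intro init
    rw [List.length_append, List.length_cons, List.length_nil, List.range_succ,
        List.foldl_append, List.foldl_append]
    have h1 : (List.range ys.length).foldl (fun st k => f st ((ys ++ [y]).getD k 0)) init =
        (List.range ys.length).foldl (fun st k => f st (ys.getD k 0)) init := by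
      apply PySem.List.foldl_congr_mem
      intro acc k hk
      have hk' : k < ys.length := List.mem_range.mp hk
      rw [List.getD_eq_getElem?_getD, List.getD_eq_getElem?_getD,
          List.getElem?_append_left hk']
    rw [h1, ih]
    simp [List.getD_eq_getElem?_getD]

theorem A_as_fold (loops : List Int) (goal : Int) :
    subset_find loops goal =
      (loops.foldl
          (fun (st : Array Int × Array Int) x => ((innerA goal x st.1 st.2), (innerA goal x st.1 st.2)))
          ((Array.replicate (goal + 1).toNat (-1 : Int)).setIfInBounds 0 0,
            Array.replicate (goal + 1).toNat (-1 : Int))).1.getD goal.toNat (-1) := by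
  unfold subset_find
  show ((PySem.List.pyRange 1 (PySem.List.len loops + 1) 1).foldl
        (fun (st : Array Int × Array Int) amount =>
          ((innerA goal (PySem.List.pyGetD loops (amount - 1) 0) st.1 st.2),
           (innerA goal (PySem.List.pyGetD loops (amount - 1) 0) st.1 st.2)))
        ((Array.replicate (goal + 1).toNat (-1 : Int)).setIfInBounds 0 0,
          Array.replicate (goal + 1).toNat (-1 : Int))).1.getD goal.toNat (-1) = _
  congr 2
  rw [PySem.List.len_eq, PySem.List.pyRange_one, List.foldl_map]
  have hcast : ((loops.length : Int) + 1 - 1).toNat = loops.length := by omega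
  rw [hcast]
  have h2 : ∀ (init : (Array Int × Array Int)),
      (List.range loops.length).foldl
        (fun st k => ((innerA goal (loops.getD k 0) st.1 st.2), (innerA goal (loops.getD k 0) st.1 st.2))) init =
      loops.foldl (fun st x => ((innerA goal x st.1 st.2), (innerA goal x st.1 st.2))) init :=
    fun init => foldl_range_getD (fun st x => ((innerA goal x st.1 st.2), (innerA goal x st.1 st.2))) loops init
  rw [← h2]
  apply PySem.List.foldl_congr_mem
  intro acc k hk
  have h3 : (1 : Int) + (k : Int) - 1 = (k : Int) := by ring
  simp only [h3, PySem.List.pyGetD_natCast]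

theorem scanLevels_eq (goal : Int) :
    ∀ (L : List (PySem.Set Int)) (k : Int),
      scanLevels goal L k =
        (match fIdx L goal with
         | none => -1
         | some j => k + (j : Int)) := by
  intro L
  induction L with
  | nil => intro k; rfl
  | cons lvl rest ih =>
    intro k
    show (if PySem.Set.contains lvl goal then k else scanLevels goal rest (k + 1)) = _
    unfold fIdx
    rw [List.findIdx?_cons]
    by_cases hc : PySem.Set.contains lvl goal = true
    · rw [if_pos hc, if_pos hc]
      simp
    · rw [if_neg hc, if_neg hc]
      rw [ih (k + 1)]
      unfold fIdx
      cases hfi : rest.findIdx? (fun lvl => PySem.Set.contains lvl goal) with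
      | none => rfl
      | some j =>
        simp only [Option.map_some]
        show k + 1 + (j : Int) = k + ((j + 1 : Nat) : Int)
        push_cast
        ring

theorem B_as_fold (loops : List Int) (goal : Int) :
    subset_find_alt loops goal =
      scanLevels goal
        (loops.foldl (fun L x => stepRec goal x PySem.Set.empty PySem.Set.empty L)
          [PySem.Set.ofList [(0 : Int)]]) 0 := rfl

-- ===== VERDICT (by name: the statement is the Claim_ definition above) =====
theorem subset_find_spec : Claim_equal_subset_find := by
  intro loops goal hdom hpre
  obtain ⟨hg, hx⟩ := hpre
  unfold Spec_subset_find
  rw [A_as_fold, B_as_fold]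
  have H := outer_Rep goal hg loops hx
    ((Array.replicate (goal + 1).toNat (-1 : Int)).setIfInBounds 0 0)
    (Array.replicate (goal + 1).toNat (-1 : Int))
    [PySem.Set.ofList [(0 : Int)]]
    (init_RepInv goal hg) (by simp)
  obtain ⟨hL, hB, hR⟩ := H
  have hfin := hR goal.toNat (by omega)
  rw [show ((goal.toNat : Nat) : Int) = goal from Int.toNat_of_nonneg hg] at hfin
  rw [hfin, scanLevels_eq goal _ 0]
  cases hfi : fIdx (loops.foldl (fun L x => stepRec goal x PySem.Set.empty PySem.Set.empty L)
      [PySem.Set.ofList [(0 : Int)]]) goal with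
  | none => rfl
  | some j => show ((j : Int)) = 0 + (j : Int); ring
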